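-- pv_equiv track=rewrite | github.com/willschipp/basketball-analytics | app/detectors/pass_detector.py | detect_interceptions
-- ===== SOURCE A (Python) =====
-- def detect_interceptions(ball_acquisition,player_assignment):
--     """
--     Detects interceptions where the ball possession changes between opposing teams.
--
--     Args:
--         ball_acquisition (list): A list indicating which player has possession of the ball in each frame.
--         player_assignment (list): A list of dictionaries indicating team assignments for each player
--             in the corresponding frame.
--
--     Returns:
--         list: A list where each element indicates if an interception occurred in that frame
--             (-1: no interception, 1: Team 1 interception, 2: Team 2 interception).
--     """
--     interceptions = [-1] * len(ball_acquisition)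
--     prev_holder=-1
--     previous_frame=-1
--
--     for frame in range(1, len(ball_acquisition)):
--         if ball_acquisition[frame - 1] != -1:
--             prev_holder = ball_acquisition[frame - 1]
--             previous_frame= frame - 1
--
--         current_holder = ball_acquisition[frame]
--
--         if prev_holder != -1 and current_holder != -1 and prev_holder != current_holder:
--             prev_team = player_assignment[previous_frame].get(prev_holder, -1)
--             current_team = player_assignment[frame].get(current_holder, -1)
--
--             if prev_team != current_team and prev_team != -1 and current_team != -1:
--                 interceptions[frame] = current_team
--
--     return interceptions
-- ===== SOURCE B (Python) =====
-- def detect_interceptions(ball_acquisition, player_assignment):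
--     # Run-length encode possession: maximal runs of consecutive possession
--     # events with the same holder, as [first_frame, holder, last_frame].
--     runs = []
--     for f, h in enumerate(ball_acquisition):
--         if h != -1:
--             if runs and runs[-1][1] == h:
--                 runs[-1][2] = f
--             else:
--                 runs.append([f, h, f])
--     # Every run boundary is a holder change; mark it sparsely when teams differ.
--     marks = {}
--     for prev_run, cur_run in zip(runs, runs[1:]):
--         pt = player_assignment[prev_run[2]].get(prev_run[1], -1)
--         ct = player_assignment[cur_run[0]].get(cur_run[1], -1)
--         if pt != ct and pt != -1 and ct != -1:
--             marks[cur_run[0]] = ct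
--     return [marks.get(i, -1) for i in range(len(ball_acquisition))]
-- ===== Notes on version B (the rewrite author's own statement) =====
-- stated objective: alternative
-- what changed: Replaces A's stateful frame scan with in-place writes into a preallocated list by a three-stage pipeline: run-length encode possession into maximal same-holder runs (which eliminates the holder-inequality test), mark qualifying run boundaries in a sparse dict, and materialize the output by a comprehension over range(n).
import Mathlib
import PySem

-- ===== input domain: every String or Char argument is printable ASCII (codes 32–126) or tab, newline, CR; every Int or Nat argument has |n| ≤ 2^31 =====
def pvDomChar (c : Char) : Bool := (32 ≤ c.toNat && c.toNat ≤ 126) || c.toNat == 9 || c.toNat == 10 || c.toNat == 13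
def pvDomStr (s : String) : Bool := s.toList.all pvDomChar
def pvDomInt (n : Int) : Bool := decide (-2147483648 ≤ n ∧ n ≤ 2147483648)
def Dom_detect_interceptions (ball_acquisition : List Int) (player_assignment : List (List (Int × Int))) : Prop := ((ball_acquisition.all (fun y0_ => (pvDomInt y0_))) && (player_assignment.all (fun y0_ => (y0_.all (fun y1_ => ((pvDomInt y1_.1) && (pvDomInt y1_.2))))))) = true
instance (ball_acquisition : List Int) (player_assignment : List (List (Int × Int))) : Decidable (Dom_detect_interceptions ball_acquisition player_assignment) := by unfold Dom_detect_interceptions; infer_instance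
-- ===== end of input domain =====

-- B replaces A's stateful frame scan (in-place writes into a preallocated list) by a
-- three-stage pipeline: run-length encode possession into maximal same-holder runs, mark
-- qualifying run boundaries in a sparse dict, and build the output over range(n)
-- (objective: alternative); same return value on all inputs where A returns.

-- ===== PORT A =====
-- loop body of A's 'for frame in range(1, len(ball_acquisition))', as a helper;
-- state = (interceptions, prev_holder, previous_frame).
-- player_assignment[...] is ported with pyGetD: out-of-range access (Python IndexError)
-- is excluded by Pre_detect_interceptions.
def detectStep (ball_acquisition : List Int) (player_assignment : List (List (Int × Int)))
    (st : List Int × Int × Int) (frame : Int) : List Int × Int × Int :=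
  let prev :=
    if PySem.List.pyGetD ball_acquisition (frame - 1) (-1) ≠ -1 then
      (PySem.List.pyGetD ball_acquisition (frame - 1) (-1), frame - 1)
    else (st.2.1, st.2.2)
  let current_holder := PySem.List.pyGetD ball_acquisition frame (-1)
  if prev.1 ≠ -1 ∧ current_holder ≠ -1 ∧ prev.1 ≠ current_holder then
    let prev_team := PySem.Dict.getD (PySem.Dict.mk (PySem.List.pyGetD player_assignment prev.2 [])) prev.1 (-1)
    let current_team := PySem.Dict.getD (PySem.Dict.mk (PySem.List.pyGetD player_assignment frame [])) current_holder (-1)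
    if prev_team ≠ current_team ∧ prev_team ≠ -1 ∧ current_team ≠ -1 then
      (PySem.List.pySetD st.1 frame current_team, prev)
    else (st.1, prev)
  else (st.1, prev)

def detect_interceptions (ball_acquisition : List Int) (player_assignment : List (List (Int × Int))) : List Int :=
  ((PySem.List.pyRange 1 (PySem.List.len ball_acquisition)).foldl
      (detectStep ball_acquisition player_assignment)
      (List.replicate ball_acquisition.length (-1), -1, -1)).1

-- ===== PORT B =====
-- body of B's first loop: extend the last run or open a new one;
-- a run is (first_frame, holder, last_frame).
def rleStep (runs : List (Int × Int × Int)) (fh : Int × Int) : List (Int × Int × Int) :=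
  match runs.getLast? with
  | some r => if r.2.1 = fh.2 then runs.dropLast ++ [(r.1, r.2.1, fh.1)] else runs ++ [(fh.1, fh.2, fh.1)]
  | none => [(fh.1, fh.2, fh.1)]

-- body of B's second loop over zip(runs, runs[1:]): sparse mark of a run boundary.
def markStep (player_assignment : List (List (Int × Int)))
    (marks : PySem.Dict Int Int) (rr : (Int × Int × Int) × (Int × Int × Int)) : PySem.Dict Int Int :=
  let pt := PySem.Dict.getD (PySem.Dict.mk (PySem.List.pyGetD player_assignment rr.1.2.2 [])) rr.1.2.1 (-1)
  let ct := PySem.Dict.getD (PySem.Dict.mk (PySem.List.pyGetD player_assignment rr.2.1 [])) rr.2.2.1 (-1)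
  if pt ≠ ct ∧ pt ≠ -1 ∧ ct ≠ -1 then marks.insert rr.2.1 ct else marks

def detect_interceptions_alt (ball_acquisition : List Int) (player_assignment : List (List (Int × Int))) : List Int :=
  let runs := (PySem.List.enumerate ball_acquisition).foldl
      (fun rs fh => if fh.2 ≠ -1 then rleStep rs fh else rs) []
  let marks := (runs.zip (PySem.List.slice runs (some 1) none)).foldl (markStep player_assignment) (PySem.Dict.mk [])
  (PySem.List.pyRange 0 (PySem.List.len ball_acquisition)).map (fun i => PySem.Dict.getD marks i (-1))

-- ===== PRECONDITION & SPEC =====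
-- Pre_ excludes exactly the inputs on which Python A raises IndexError: a pair of adjacent
-- possession events with different holders whose later frame is not an index of
-- player_assignment (B raises there too).
def Pre_detect_interceptions (ball_acquisition : List Int) (player_assignment : List (List (Int × Int))) : Prop :=
  ∀ pc ∈ (((PySem.List.enumerate ball_acquisition).filter (fun p => decide (p.2 ≠ -1))).zip
          ((PySem.List.enumerate ball_acquisition).filter (fun p => decide (p.2 ≠ -1))).tail),
    pc.1.2 ≠ pc.2.2 → pc.2.1 < (player_assignment.length : Int)
instance (ball_acquisition : List Int) (player_assignment : List (List (Int × Int))) : Decidable (Pre_detect_interceptions ball_acquisition player_assignment) := by unfold Pre_detect_interceptions; infer_instance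

def pvWitness_detect_interceptions : List Int × (List (List (Int × Int))) :=
  ([1, -1, 2], [[(1, 1)], [], [(2, 2)]])

def Spec_detect_interceptions (ball_acquisition : List Int) (player_assignment : List (List (Int × Int))) (out : List Int) : Prop := out = detect_interceptions_alt ball_acquisition player_assignment
instance (ball_acquisition : List Int) (player_assignment : List (List (Int × Int))) (out : List Int) : Decidable (Spec_detect_interceptions ball_acquisition player_assignment out) := by unfold Spec_detect_interceptions; infer_instance

-- ===== CLAIM (what is proved, stated in full; the proofs are below) =====
def Claim_equal_detect_interceptions : Prop := ∀ (ball_acquisition : List Int) (player_assignment : List (List (Int × Int))), Dom_detect_interceptions ball_acquisition player_assignment → Pre_detect_interceptions ball_acquisition player_assignment → Spec_detect_interceptions ball_acquisition player_assignment (detect_interceptions ball_acquisition player_assignment)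

-- ===== LEMMAS AND PROOFS =====

-- proof-side view of A's loop: processing one adjacent possession-event pair
def altStep (player_assignment : List (List (Int × Int)))
    (ints : List Int) (pc : (Int × Int) × (Int × Int)) : List Int :=
  if pc.1.2 ≠ pc.2.2 then
    let pt := PySem.Dict.getD (PySem.Dict.mk (PySem.List.pyGetD player_assignment pc.1.1 [])) pc.1.2 (-1)
    let ct := PySem.Dict.getD (PySem.Dict.mk (PySem.List.pyGetD player_assignment pc.2.1 [])) pc.2.2 (-1)
    if pt ≠ ct ∧ pt ≠ -1 ∧ ct ≠ -1 then PySem.List.pySetD ints pc.2.1 ct else ints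
  else ints

-- pairwise processor over the event list: A's loop reduced to adjacent event pairs
def goB (pa : List (List (Int × Int))) : List (Int × Int) → List Int → List Int
  | p :: c :: rest, ints => goB pa (c :: rest) (altStep pa ints (p, c))
  | _, ints => ints

-- last possession event strictly before frame j (index, holder)
def lastEv (ba : List Int) : Nat → Option (Int × Int)
  | 0 => none
  | j + 1 => if ba.getD j (-1) ≠ -1 then some ((j : Int), ba.getD j (-1)) else lastEv ba j

-- A's (prev_holder, previous_frame) encoding of the last event
def enc : Option (Int × Int) → Int × Int
  | none => (-1, -1)
  | some ih => (ih.2, ih.1)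

def optList {α : Type} : Option α → List α
  | none => []
  | some e => [e]

-- possession events with frame index in [m, m+k)
def ewin (ba : List Int) : Nat → Nat → List (Int × Int)
  | _, 0 => []
  | m, k + 1 =>
    (if ba.getD m (-1) ≠ -1 then [((m : Int), ba.getD m (-1))] else []) ++ ewin ba (m + 1) k

theorem lastEv_snd_ne (ba : List Int) (j : Nat) (i h : Int)
    (hj : lastEv ba j = some (i, h)) : h ≠ -1 := by
  induction j with
  | zero => simp [lastEv] at hj
  | succ j ih =>
    rw [lastEv] at hj
    split at hj
    · rename_i hne; cases hj; exact hne
    · exact ih hj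

theorem goB_optList (pa : List (List (Int × Int))) (e : Option (Int × Int)) (ints : List Int) :
    goB pa (optList e) ints = ints := by
  cases e <;> rfl

-- MAIN LOOP INVARIANT: running A's loop over frames j+1 .. j+k, started with the state
-- describing the last event before frame j+1, is the pairwise processor over
-- (last event before frame j+1) :: (events in [j+1, j+1+k)).
theorem loopA_eq_goB (ba : List Int) (pa : List (List (Int × Int))) :
    ∀ (k j : Nat) (ints : List Int),
      (PySem.List.pyRange ((j : Int) + 1) ((j : Int) + 1 + (k : Int))).foldl
          (detectStep ba pa) (ints, enc (lastEv ba j))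
        = (goB pa (optList (lastEv ba (j + 1)) ++ ewin ba (j + 1) k) ints,
           enc (lastEv ba (j + k))) := by
  intro k
  induction k with
  | zero =>
    intro j ints
    rw [PySem.List.pyRange_one_eq_nil (by omega)]
    simp [ewin, goB_optList]
  | succ k ih =>
    intro j ints
    rw [PySem.List.pyRange_one_cons (by push_cast; omega), List.foldl_cons]
    have h1 : ((j : Int) + 1) + 1 = ((j + 1 : Nat) : Int) + 1 := by push_cast; ring
    have h2 : (j : Int) + 1 + ((k + 1 : Nat) : Int) = ((j + 1 : Nat) : Int) + 1 + (k : Int) := by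
      push_cast; ring
    rw [h1, h2]
    have e1 : PySem.List.pyGetD ba ((j : Int) + 1 - 1) (-1) = ba[j]?.getD (-1) := by
      rw [show (j : Int) + 1 - 1 = ((j : Nat) : Int) by ring, PySem.List.pyGetD_natCast,
        List.getD_eq_getElem?_getD]
    have e2 : PySem.List.pyGetD ba ((j : Int) + 1) (-1) = ba[j + 1]?.getD (-1) := by
      rw [show (j : Int) + 1 = ((j + 1 : Nat) : Int) by push_cast; ring, PySem.List.pyGetD_natCast,
        List.getD_eq_getElem?_getD]
    have hcast : ((j + 1 : Nat) : Int) = (j : Int) + 1 := by push_cast; ring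
    have hjk : j + 1 + k = j + (k + 1) := by omega
    by_cases hc : ba[j + 1]?.getD (-1) = -1
    · -- ball_acquisition[frame] == -1: no update, prev carries over
      have hstep : detectStep ba pa (ints, enc (lastEv ba j)) ((j : Int) + 1)
          = (ints, enc (lastEv ba (j + 1))) := by
        by_cases hj : ba[j]?.getD (-1) = -1
        · have hl : lastEv ba (j + 1) = lastEv ba j := by rw [lastEv]; simp [hj]
          simp [detectStep, e1, e2, hj, hc, hl]
        · have hl : lastEv ba (j + 1) = some ((j : Int), ba[j]?.getD (-1)) := by
            rw [lastEv]; simp [hj]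
          simp [detectStep, e1, e2, hj, hc, hl, enc]
      have hl2 : lastEv ba (j + 1 + 1) = lastEv ba (j + 1) := by rw [lastEv]; simp [hc]
      have hew : ewin ba (j + 1) (k + 1) = ewin ba (j + 1 + 1) k := by rw [ewin]; simp [hc]
      rw [hstep, ih (j + 1), hl2, hew, hjk]
    · -- ball_acquisition[frame] is a possession event
      have hl2 : lastEv ba (j + 1 + 1) = some (((j + 1 : Nat) : Int), ba[j + 1]?.getD (-1)) := by
        rw [lastEv]; simp [hc]
      have hew : ewin ba (j + 1) (k + 1)
          = (((j + 1 : Nat) : Int), ba[j + 1]?.getD (-1)) :: ewin ba (j + 1 + 1) k := by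
        rw [ewin]; simp [hc]
      rcases hle : lastEv ba (j + 1) with _ | ⟨i, h⟩
      · -- no previous event: the guard prev_holder != -1 fails
        have hj : ba[j]?.getD (-1) = -1 := by
          by_contra hj; rw [lastEv] at hle; simp [hj] at hle
        have hlej : lastEv ba j = none := by rw [lastEv] at hle; simpa [hj] using hle
        have hstep : detectStep ba pa (ints, enc (lastEv ba j)) ((j : Int) + 1)
            = (ints, enc (lastEv ba (j + 1))) := by
          simp [detectStep, e1, e2, hj, hlej, hle, enc]
        rw [hstep, ih (j + 1), hl2, hew]
        simp [optList, hjk, hle]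
      · -- previous event (i, h): this frame processes the adjacent event pair
        have hne : h ≠ -1 := lastEv_snd_ne ba (j + 1) i h hle
        have hstep : detectStep ba pa (ints, enc (lastEv ba j)) ((j : Int) + 1)
            = (altStep pa ints ((i, h), (((j + 1 : Nat) : Int), ba[j + 1]?.getD (-1))),
               enc (lastEv ba (j + 1))) := by
          by_cases hj : ba[j]?.getD (-1) = -1
          · have hlej : lastEv ba j = some (i, h) := by
              rw [lastEv] at hle; simpa [hj] using hle
            simp [detectStep, altStep, e1, e2, hj, hc, hne, hlej, hle, enc, hcast]
            split_ifs <;> rfl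
          · have hij : (j : Int) = i ∧ ba[j]?.getD (-1) = h := by
              rw [lastEv] at hle; simpa [hj] using hle
            obtain ⟨hi, hh⟩ := hij
            subst hi; subst hh
            simp [detectStep, altStep, e1, e2, hj, hc, hle, enc, hcast, hne]
            split_ifs <;> rfl
        rw [hstep, ih (j + 1), hl2, hew]
        simp [optList, goB, hjk, hle]

theorem ewin_enum (ba : List Int) :
    ∀ (k m : Nat), ba.length = m + k →
      ewin ba m k = (PySem.List.enumerate (ba.drop m) (m : Int)).filter (fun p => decide (p.2 ≠ -1)) := by
  intro k
  induction k with
  | zero =>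
    intro m hm
    rw [List.drop_of_length_le (by omega)]
    simp [ewin, PySem.List.enumerate]
  | succ k ih =>
    intro m hm
    have hlt : m < ba.length := by omega
    rw [← List.getElem_cons_drop hlt, PySem.List.enumerate_cons]
    have : ((m : Int) + 1) = ((m + 1 : Nat) : Int) := by push_cast; ring
    rw [this, ewin, List.getD_eq_getElem ba (-1) hlt, ih (m + 1) (by omega)]
    by_cases hv : ba[m] = -1 <;> simp [hv, List.filter_cons]

theorem zip_tail_foldl_eq_goB (pa : List (List (Int × Int))) :
    ∀ (l : List (Int × Int)) (ints : List Int),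
      (l.zip l.tail).foldl (altStep pa) ints = goB pa l ints := by
  intro l
  induction l with
  | nil => intro ints; rfl
  | cons a t ih =>
    intro ints
    cases t with
    | nil => rfl
    | cons b t2 =>
      show ((a :: b :: t2).zip (b :: t2)).foldl (altStep pa) ints = _
      rw [List.zip_cons_cons, List.foldl_cons]
      exact ih (altStep pa ints (a, b))

-- A equals the fold of altStep over adjacent possession-event pairs
theorem detect_eq_pairFold (ba : List Int) (pa : List (List (Int × Int))) :
    detect_interceptions ba pa
      = (((PySem.List.enumerate ba).filter (fun p => decide (p.2 ≠ -1))).zip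
          ((PySem.List.enumerate ba).filter (fun p => decide (p.2 ≠ -1))).tail).foldl
          (altStep pa) (List.replicate ba.length (-1)) := by
  simp only [detect_interceptions]
  rw [zip_tail_foldl_eq_goB pa]
  by_cases hba : ba = []
  · subst hba; rfl
  · have h0 : 0 < ba.length := List.length_pos_iff.mpr hba
    have key := loopA_eq_goB ba pa (ba.length - 1) 0
    have eL : ((0 : Nat) : Int) + 1 + ((ba.length - 1 : Nat) : Int) = PySem.List.len ba := by
      simp [PySem.List.len]
      push_cast
      omega
    have e0 : ((0 : Nat) : Int) + 1 = 1 := by norm_num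
    rw [eL, e0] at key
    have encnone : enc (lastEv ba 0) = ((-1 : Int), (-1 : Int)) := rfl
    rw [encnone] at key
    rw [key]
    have hlist : optList (lastEv ba (0 + 1)) ++ ewin ba (0 + 1) (ba.length - 1)
        = ewin ba 0 ba.length := by
      have hL : ba.length = (ba.length - 1) + 1 := by omega
      conv_rhs => rw [hL, ewin]
      by_cases h00 : ba[0]?.getD (-1) = -1 <;> simp [lastEv, optList, h00]
    rw [hlist, ewin_enum ba ba.length 0 (by omega)]
    simp

-- the write an adjacent-event pair with differing holders produces, if any
def wr0 (pa : List (List (Int × Int))) (pc : (Int × Int) × (Int × Int)) : Option (Int × Int) :=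
  let pt := PySem.Dict.getD (PySem.Dict.mk (PySem.List.pyGetD pa pc.1.1 [])) pc.1.2 (-1)
  let ct := PySem.Dict.getD (PySem.Dict.mk (PySem.List.pyGetD pa pc.2.1 [])) pc.2.2 (-1)
  if pt ≠ ct ∧ pt ≠ -1 ∧ ct ≠ -1 then some (pc.2.1, ct) else none

-- the (frame, team) writes produced by a list of event pairs
def writesE (pa : List (List (Int × Int))) (L : List ((Int × Int) × (Int × Int))) : List (Int × Int) :=
  (L.filter (fun pc => decide (pc.1.2 ≠ pc.2.2))).filterMap (wr0 pa)

theorem foldl_altStep_eq_writes (pa : List (List (Int × Int))) :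
    ∀ (L : List ((Int × Int) × (Int × Int))) (ints : List Int),
      L.foldl (altStep pa) ints
        = (writesE pa L).foldl (fun a iv => PySem.List.pySetD a iv.1 iv.2) ints := by
  intro L
  induction L with
  | nil => intro ints; rfl
  | cons pc t ih =>
    intro ints
    rw [List.foldl_cons]
    by_cases hh : pc.1.2 = pc.2.2
    · have : altStep pa ints pc = ints := by simp [altStep, hh]
      rw [this, ih]
      simp [writesE, List.filter_cons, hh]
    · simp only [writesE, List.filter_cons, decide_eq_true_eq]
      rw [if_pos hh]
      rw [List.filterMap_cons]
      cases hw : wr0 pa pc with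
      | none =>
        have : altStep pa ints pc = ints := by
          simp only [altStep, wr0] at *
          rw [if_pos hh]
          split_ifs with hcond
          · rw [if_pos hcond] at hw; simp at hw
          · rfl
        rw [this, ih]; rfl
      | some iv =>
        have : altStep pa ints pc = PySem.List.pySetD ints iv.1 iv.2 := by
          simp only [altStep, wr0] at *
          rw [if_pos hh]
          split_ifs with hcond
          · rw [if_pos hcond] at hw
            cases hw; rfl
          · rw [if_neg hcond] at hw; simp at hw
        rw [this, ih]
        simp [writesE]

-- boundary event pairs of a run list
def bnd (R : List (Int × Int × Int)) : List ((Int × Int) × (Int × Int)) :=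
  (R.zip R.tail).map (fun rr => ((rr.1.2.2, rr.1.2.1), (rr.2.1, rr.2.2.1)))

theorem foldl_markStep_eq_writes (pa : List (List (Int × Int))) :
    ∀ (R : List (Int × Int × Int)) (d : PySem.Dict Int Int),
      (R.zip R.tail).foldl (markStep pa) d
        = ((bnd R).filterMap (wr0 pa)).foldl (fun d iv => d.insert iv.1 iv.2) d := by
  have core : ∀ (P : List ((Int × Int × Int) × (Int × Int × Int))) (d : PySem.Dict Int Int),
      P.foldl (markStep pa) d
        = ((P.map (fun rr => ((rr.1.2.2, rr.1.2.1), (rr.2.1, rr.2.2.1)))).filterMap (wr0 pa)).foldl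
            (fun d iv => d.insert iv.1 iv.2) d := by
    intro P
    induction P with
    | nil => intro d; rfl
    | cons rr t ih =>
      intro d
      rw [List.foldl_cons, List.map_cons, List.filterMap_cons]
      cases hw : wr0 pa ((rr.1.2.2, rr.1.2.1), (rr.2.1, rr.2.2.1)) with
      | none =>
        have : markStep pa d rr = d := by
          simp only [markStep, wr0] at *
          split_ifs with hcond
          · rw [if_pos hcond] at hw; simp at hw
          · rfl
        rw [this, ih]
      | some iv =>
        have : markStep pa d rr = d.insert iv.1 iv.2 := by
          simp only [markStep, wr0] at *
          split_ifs with hcond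
          · rw [if_pos hcond] at hw; cases hw; rfl
          · rw [if_neg hcond] at hw; simp at hw
        rw [this, ih]
        rfl
  intro R d
  exact core (R.zip R.tail) d

-- merge a stream of events into an open run (f0, h0, l0) followed by fresh runs
def mergeRun (r : Int × Int × Int) : List (Int × Int) → List (Int × Int × Int)
  | [] => [r]
  | (f, h) :: rest => if h = r.2.1 then mergeRun (r.1, r.2.1, f) rest else r :: mergeRun (f, h, f) rest

theorem foldl_rleStep_append (E : List (Int × Int)) :
    ∀ (rs : List (Int × Int × Int)) (r : Int × Int × Int),
      E.foldl rleStep (rs ++ [r]) = rs ++ mergeRun r E := by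
  induction E with
  | nil => intro rs r; rfl
  | cons fh t ih =>
    intro rs r
    rw [List.foldl_cons]
    obtain ⟨f, h⟩ := fh
    by_cases hh : h = r.2.1
    · have : rleStep (rs ++ [r]) (f, h) = rs ++ [(r.1, r.2.1, f)] := by
        simp [rleStep, hh]
      rw [this, ih rs (r.1, r.2.1, f), mergeRun, if_pos hh]
    · have hh' : ¬ r.2.1 = h := fun e => hh e.symm
      have : rleStep (rs ++ [r]) (f, h) = (rs ++ [r]) ++ [(f, h, f)] := by
        simp [rleStep, hh']
      rw [this, ih (rs ++ [r]) (f, h, f), mergeRun, if_neg hh]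
      simp

theorem mergeRun_head (E : List (Int × Int)) :
    ∀ (f0 h0 l0 : Int), ∃ l1 rs, mergeRun (f0, h0, l0) E = (f0, h0, l1) :: rs := by
  induction E with
  | nil => intro f0 h0 l0; exact ⟨l0, [], rfl⟩
  | cons fh t ih =>
    intro f0 h0 l0
    obtain ⟨f, h⟩ := fh
    by_cases hh : h = h0
    · rw [mergeRun, if_pos hh]
      exact ih f0 h0 f
    · rw [mergeRun, if_neg hh]
      exact ⟨l0, mergeRun (f, h, f) t, rfl⟩

-- run boundaries are exactly the adjacent event pairs with differing holders
theorem bnd_mergeRun (E : List (Int × Int)) :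
    ∀ (f0 h0 l0 : Int),
      bnd (mergeRun (f0, h0, l0) E)
        = (((l0, h0) :: E).zip E).filter (fun pc => decide (pc.1.2 ≠ pc.2.2)) := by
  induction E with
  | nil => intro f0 h0 l0; rfl
  | cons fh t ih =>
    intro f0 h0 l0
    obtain ⟨f, h⟩ := fh
    by_cases hh : h = h0
    · rw [mergeRun, if_pos hh, ih f0 h0 f]
      subst hh
      simp [List.zip_cons_cons, List.filter_cons]
    · rw [mergeRun, if_neg hh]
      obtain ⟨l1, rs, hm⟩ := mergeRun_head t f h f
      have hb : bnd ((f0, h0, l0) :: mergeRun (f, h, f) t)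
          = ((l0, h0), (f, h)) :: bnd (mergeRun (f, h, f) t) := by
        rw [hm]
        simp [bnd, List.zip_cons_cons]
      rw [hb, ih f h f]
      have hh' : ¬ h0 = h := fun e => hh e.symm
      simp [List.zip_cons_cons, List.filter_cons, hh']

-- B's runs-fold produces exactly mergeRun of the event list
theorem runs_eq_mergeRun (ba : List Int) :
    ((PySem.List.enumerate ba).foldl (fun rs fh => if fh.2 ≠ -1 then rleStep rs fh else rs) [])
      = (match (PySem.List.enumerate ba).filter (fun p => decide (p.2 ≠ -1)) with
         | [] => []
         | e :: E => mergeRun (e.1, e.2, e.1) E) := by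
  rw [PySem.List.foldl_ite_eq_foldl_filter]
  cases hE : (PySem.List.enumerate ba).filter (fun p => decide (p.2 ≠ -1)) with
  | nil => rfl
  | cons e E =>
    rw [List.foldl_cons]
    have h1 : rleStep [] e = [] ++ [(e.1, e.2, e.1)] := by simp [rleStep]
    rw [h1, foldl_rleStep_append E [] (e.1, e.2, e.1)]
    rfl

-- pointwise bridge: fold of in-range writes into a replicate list
-- equals reading the same writes back from a dict over range(n)
theorem writes_fold_eq_dict (n : Nat) :
    ∀ (ws : List (Int × Int)) (a : List Int) (d : PySem.Dict Int Int),
      a.length = n →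
      (∀ k : Nat, k < n → a[k]? = some (d.getD (k : Int) (-1))) →
      (∀ iv ∈ ws, 0 ≤ iv.1 ∧ iv.1 < (n : Int)) →
      ws.foldl (fun a iv => PySem.List.pySetD a iv.1 iv.2) a
        = (PySem.List.pyRange 0 (n : Int)).map
            (fun i => PySem.Dict.getD (ws.foldl (fun d iv => d.insert iv.1 iv.2) d) i (-1)) := by
  intro ws
  induction ws with
  | nil =>
    intro a d hlen hpt _
    rw [List.foldl_nil, List.foldl_nil]
    rw [PySem.List.pyRange_one 0 (n : Int)]
    simp only [sub_zero, Int.toNat_natCast]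
    apply List.ext_getElem
    · simp [hlen]
    · intro k hk1 hk2
      simp only [List.getElem_map, List.getElem_range]
      have h := hpt k (by omega)
      rw [List.getElem?_eq_getElem hk1] at h
      injection h with h
      rw [h]
      norm_num
  | cons iv t ih =>
    intro a d hlen hpt hin
    rw [List.foldl_cons, List.foldl_cons]
    have hiv := hin iv (by simp)
    apply ih
    · rw [PySem.List.pySetD_of_nonneg a iv.2 hiv.1]
      simp [hlen]
    · intro k hk
      rw [PySem.List.pySetD_of_nonneg a iv.2 hiv.1]
      rw [PySem.Dict.getD_insert]
      by_cases hke : (k : Int) = iv.1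
      · rw [if_pos hke]
        have hkk : iv.1.toNat = k := by omega
        rw [← hkk, List.getElem?_set_self (by omega)]
      · rw [if_neg hke]
        rw [List.getElem?_set_ne (by omega)]
        exact hpt k hk
    · intro jv hjv; exact hin jv (by simp [hjv])

-- every write targets a frame index of ball_acquisition
theorem writes_in_range (ba : List Int) (pa : List (List (Int × Int)))
    (iv : Int × Int)
    (hiv : iv ∈ writesE pa
        ((((PySem.List.enumerate ba).filter (fun p => decide (p.2 ≠ -1))).zip
          ((PySem.List.enumerate ba).filter (fun p => decide (p.2 ≠ -1))).tail))) :
    0 ≤ iv.1 ∧ iv.1 < (ba.length : Int) := by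
  simp only [writesE, List.mem_filterMap, List.mem_filter] at hiv
  obtain ⟨pc, ⟨hz, _⟩, hw⟩ := hiv
  have hfrom : iv.1 = pc.2.1 := by
    simp only [wr0] at hw
    split_ifs at hw
    · cases hw; rfl
  have hmem : pc.2 ∈ (PySem.List.enumerate ba).filter (fun p => decide (p.2 ≠ -1)) := by
    have := (List.of_mem_zip hz).2
    exact List.mem_of_mem_tail this
  have hmem2 : pc.2 ∈ PySem.List.enumerate ba := List.mem_of_mem_filter hmem
  rw [PySem.List.mem_enumerate_iff] at hmem2
  obtain ⟨k, hk, hpk⟩ := hmem2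
  rw [hfrom, hpk]
  constructor <;> simp <;> omega

-- B's run boundaries are exactly the adjacent possession-event pairs with differing holders
theorem bnd_runs (ba : List Int) :
    bnd ((PySem.List.enumerate ba).foldl (fun rs fh => if fh.2 ≠ -1 then rleStep rs fh else rs) [])
      = ((((PySem.List.enumerate ba).filter (fun p => decide (p.2 ≠ -1))).zip
          ((PySem.List.enumerate ba).filter (fun p => decide (p.2 ≠ -1))).tail).filter
          (fun pc => decide (pc.1.2 ≠ pc.2.2))) := by
  rw [runs_eq_mergeRun]
  cases hE : (PySem.List.enumerate ba).filter (fun p => decide (p.2 ≠ -1)) with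
  | nil => rfl
  | cons e E => rw [bnd_mergeRun E e.1 e.2 e.1]; rfl

-- the two programs agree
theorem detect_eq_alt (ba : List Int) (pa : List (List (Int × Int))) :
    detect_interceptions ba pa = detect_interceptions_alt ba pa := by
  simp only [detect_interceptions_alt, PySem.List.slice_from_one]
  rw [foldl_markStep_eq_writes, bnd_runs]
  rw [detect_eq_pairFold ba pa, foldl_altStep_eq_writes]
  simp only [writesE]
  have hlen : PySem.List.len ba = ((ba.length : Nat) : Int) := by simp
  rw [hlen]
  apply writes_fold_eq_dict
  · simp
  · intro k hk
    simp [hk, PySem.Dict.getD, PySem.Dict.get?]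
  · intro iv hiv
    exact writes_in_range ba pa iv hiv

-- ===== VERDICT (by name: the statement is the Claim_ definition above) =====
theorem detect_interceptions_spec : Claim_equal_detect_interceptions := by
  intro ba pa _ _
  unfold Spec_detect_interceptions
  exact detect_eq_alt ba pa
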